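-- pv_equiv track=rewrite | github.com/Taoge123/OptimizedLeetcode | LeetcodeNew/Other/AQ_OA.py | solution
-- ===== SOURCE A (Python) =====
-- def solution(arr):
--     # Type your solution here
--     if not arr:
--         return ""
--
--     """
--     [3,6,2,9,-1,10]
--        6   9 -1
--     """
--     #     0 1 3 4 7  8  9  10
--     #       2 5 6 11 12 13 14
--
--     layer = 1
--     left = []
--     right = []
--
--     i, j = 1, 2
--     left.append(arr[i])
--     queue1 = [i]
--     right.append(arr[j])
--     queue2 = [j]
--     while queue1:
--         node = queue1.pop(0)
--         if node > len(arr):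
--             break
--         if node * 2 + 1 < len(arr):
--             queue1.append(node * 2 + 1)
--             left.append(arr[node * 2 + 1])
--
--         if node * 2 + 2 < len(arr):
--             queue1.append(node * 2 + 2)
--             left.append(arr[node * 2 + 2])
--
--     while queue2:
--         node = queue2.pop(0)
--         if node > len(arr):
--             break
--         if node * 2 + 1 < len(arr):
--             queue2.append(node * 2 + 1)
--             right.append(arr[node * 2 + 1])
--
--         if node * 2 + 2 < len(arr):
--             queue2.append(node * 2 + 2)
--             right.append(arr[node * 2 + 2])
--
--     if sum(left) > sum(right):
--         return "Left"
--     elif sum(left) < sum(right):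
--         return "Right"
--     else:
--         return ""
-- ===== SOURCE B (Python) =====
-- def solution(arr):
--     if not arr:
--         return ""
--     left = arr[1]
--     right = arr[2]
--     for i in range(3, len(arr)):
--         r = i
--         while r > 2:
--             r = (r - 1) // 2
--         if r == 1:
--             left += arr[i]
--         else:
--             right += arr[i]
--     if left > right:
--         return "Left"
--     elif left < right:
--         return "Right"
--     else:
--         return ""
-- ===== Notes on version B (the rewrite author's own statement) =====
-- stated objective: faster
-- what changed: Replaces the two explicit BFS queue traversals (with quadratic list.pop(0) and per-subtree value lists) by a single ascending index scan that classifies each index by walking parent links (r=(r-1)//2) up to its governing root, accumulating two plain integer sums.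
import Mathlib
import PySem

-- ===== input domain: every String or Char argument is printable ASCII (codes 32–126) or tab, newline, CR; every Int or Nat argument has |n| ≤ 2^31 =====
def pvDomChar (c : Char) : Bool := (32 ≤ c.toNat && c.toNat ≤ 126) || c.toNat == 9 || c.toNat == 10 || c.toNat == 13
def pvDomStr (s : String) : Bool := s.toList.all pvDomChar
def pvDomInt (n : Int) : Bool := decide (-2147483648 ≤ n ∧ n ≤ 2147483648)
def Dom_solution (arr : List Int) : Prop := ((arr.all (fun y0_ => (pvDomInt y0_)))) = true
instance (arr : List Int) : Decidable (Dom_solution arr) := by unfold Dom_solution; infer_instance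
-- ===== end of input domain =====

-- B replaces A's two BFS queue traversals by one ascending scan that classifies each
-- index by its governing subtree root (objective: simpler).
-- Indexing is ported with List.getD 0, exact here: under Pre_ every executed access is
-- in range (arr[1]/arr[2] need length ≥ 3; BFS children are pushed only when < length).

-- ===== PORT A =====
-- termination helpers for the BFS queue (cited by decreasing_by)
lemma pv_pow_lt {a e : Nat} (h : a < e) : 2 ^ a < 2 ^ e :=
  Nat.pow_lt_pow_right one_lt_two h

lemma pv_pow_aux {a b e : Nat} (hb : b < a) (ha : a < e) : 2 ^ a + 2 ^ b < 2 ^ e := by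
  have h1 : 2 ^ b < 2 ^ a := pv_pow_lt hb
  have h2 : 2 ^ a + 2 ^ a ≤ 2 ^ e := by
    calc 2 ^ a + 2 ^ a = 2 ^ (a + 1) := by ring
    _ ≤ 2 ^ e := Nat.pow_le_pow_right (by omega) (by omega)
  omega

def solBfs (arr : List Int) : List Nat → List Int → List Int
  | [], acc => acc
  | node :: rest, acc =>
    if node > arr.length then acc
    else
      if 2 * node + 1 < arr.length then
        if 2 * node + 2 < arr.length then
          solBfs arr (rest ++ [2 * node + 1] ++ [2 * node + 2])
            (acc ++ [arr.getD (2 * node + 1) 0] ++ [arr.getD (2 * node + 2) 0])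
        else
          solBfs arr (rest ++ [2 * node + 1]) (acc ++ [arr.getD (2 * node + 1) 0])
      else
        if 2 * node + 2 < arr.length then
          solBfs arr (rest ++ [2 * node + 2]) (acc ++ [arr.getD (2 * node + 2) 0])
        else
          solBfs arr rest acc
termination_by queue _ => (queue.map (fun q => 2 ^ (arr.length + 2 - q))).sum
decreasing_by
  · simp only [List.map_append, List.map_cons, List.map_nil, List.sum_append, List.sum_cons,
      List.sum_nil]
    have := pv_pow_aux (a := arr.length + 2 - (2 * node + 1))
      (b := arr.length + 2 - (2 * node + 2)) (e := arr.length + 2 - node)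
      (by omega) (by omega)
    omega
  · simp only [List.map_append, List.map_cons, List.map_nil, List.sum_append, List.sum_cons,
      List.sum_nil]
    have := pv_pow_lt (a := arr.length + 2 - (2 * node + 1)) (e := arr.length + 2 - node)
      (by omega)
    omega
  · omega
  · simp only [List.map_cons, List.sum_cons]
    have : 1 ≤ 2 ^ (arr.length + 2 - node) := Nat.one_le_two_pow
    omega

def solution (arr : List Int) : String :=
  if arr = [] then ""
  else
    let left := solBfs arr [1] [arr.getD 1 0]
    let right := solBfs arr [2] [arr.getD 2 0]
    if left.sum > right.sum then "Left"
    else if left.sum < right.sum then "Right"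
    else ""

-- ===== PORT B =====
def rootOf (r : Nat) : Nat :=
  if r > 2 then rootOf ((r - 1) / 2) else r
termination_by r
decreasing_by omega

def solution_alt (arr : List Int) : String :=
  if arr = [] then ""
  else
    let p := (PySem.List.pyRange 3 arr.length 1).foldl
      (fun (p : Int × Int) i =>
        if rootOf i.toNat = 1 then (p.1 + arr.getD i.toNat 0, p.2)
        else (p.1, p.2 + arr.getD i.toNat 0))
      (arr.getD 1 0, arr.getD 2 0)
    if p.1 > p.2 then "Left"
    else if p.1 < p.2 then "Right"
    else ""

-- ===== PRECONDITION & SPEC =====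
-- Pre_ excludes exactly the lists of length 1 or 2, on which Python A raises IndexError
-- (arr[1] or arr[2]); B raises there too.
def Pre_solution (arr : List Int) : Prop := arr = [] ∨ 3 ≤ arr.length
instance (arr : List Int) : Decidable (Pre_solution arr) := by unfold Pre_solution; infer_instance
def pvWitness_solution : List Int := [1, 2, 3]

def Spec_solution (arr : List Int) (out : String) : Prop := out = solution_alt arr
instance (arr : List Int) (out : String) : Decidable (Spec_solution arr out) := by
  unfold Spec_solution; infer_instance

-- ===== CLAIM (what is proved, stated in full; the proofs are below) =====
def Claim_equal_solution : Prop :=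
  ∀ (arr : List Int), Dom_solution arr → Pre_solution arr → Spec_solution arr (solution arr)

-- ===== LEMMAS AND PROOFS =====

-- i is in the heap subtree rooted at q (parent link: i ↦ (i-1)/2)
def isDesc (q : Nat) (i : Nat) : Bool :=
  if i = q then true
  else if i ≤ q then false
  else isDesc q ((i - 1) / 2)
termination_by i
decreasing_by omega

lemma isDesc_lt {q i : Nat} (h : i < q) : isDesc q i = false := by
  rw [isDesc]; simp [Nat.ne_of_lt h, Nat.le_of_lt h]

lemma isDesc_self (q : Nat) : isDesc q q = true := by rw [isDesc]; simp

lemma isDesc_ge {q i : Nat} (h : isDesc q i = true) : q ≤ i := by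
  by_contra hc
  rw [isDesc_lt (by omega)] at h
  exact Bool.false_ne_true h

-- subtree of q splits as {q} ∪ subtree(2q+1) ∪ subtree(2q+2)
lemma isDesc_split (q : Nat) : ∀ i, (isDesc q i = true ∧ i ≠ q) ↔
    (isDesc (2 * q + 1) i = true ∨ isDesc (2 * q + 2) i = true) := by
  intro i
  induction i using Nat.strong_induction_on with
  | _ i ih =>
    constructor
    · rintro ⟨hd, hne⟩
      have hgt : q < i := lt_of_le_of_ne (isDesc_ge hd) (Ne.symm hne)
      rw [isDesc, if_neg hne, if_neg (by omega)] at hd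
      by_cases hp : (i - 1) / 2 = q
      · have : i = 2 * q + 1 ∨ i = 2 * q + 2 := by omega
        rcases this with h | h <;> subst h
        · exact Or.inl (isDesc_self _)
        · exact Or.inr (isDesc_self _)
      · have hlt : (i - 1) / 2 < i := by omega
        rcases (ih _ hlt).1 ⟨hd, hp⟩ with h | h
        · have h1 : 2 * q + 1 ≤ (i - 1) / 2 := isDesc_ge h
          refine Or.inl ?_
          rw [isDesc, if_neg (by omega), if_neg (by omega)]
          exact h
        · have h1 : 2 * q + 2 ≤ (i - 1) / 2 := isDesc_ge h
          refine Or.inr ?_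
          rw [isDesc, if_neg (by omega), if_neg (by omega)]
          exact h
    · intro h
      have hge : 2 * q + 1 ≤ i := by
        rcases h with h | h
        · exact isDesc_ge h
        · have := isDesc_ge h; omega
      refine ⟨?_, by omega⟩
      rw [isDesc, if_neg (by omega), if_neg (by omega)]
      by_cases hp : (i - 1) / 2 = q
      · rw [hp]; exact isDesc_self q
      · have hOr : isDesc (2 * q + 1) ((i - 1) / 2) = true ∨
            isDesc (2 * q + 2) ((i - 1) / 2) = true := by
          rcases h with h | h
          · rcases eq_or_ne i (2 * q + 1) with he | he
            · omega
            · have h1 : 2 * q + 1 ≤ i := isDesc_ge h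
              rw [isDesc, if_neg he, if_neg (by omega)] at h
              exact Or.inl h
          · rcases eq_or_ne i (2 * q + 2) with he | he
            · omega
            · have h1 : 2 * q + 2 ≤ i := isDesc_ge h
              rw [isDesc, if_neg he, if_neg (by omega)] at h
              exact Or.inr h
        exact ((ih ((i - 1) / 2) (by omega)).2 hOr).1

-- the two child subtrees are disjoint
lemma isDesc_disjoint (q : Nat) : ∀ i,
    ¬(isDesc (2 * q + 1) i = true ∧ isDesc (2 * q + 2) i = true) := by
  intro i
  induction i using Nat.strong_induction_on with
  | _ i ih =>
    rintro ⟨h1, h2⟩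
    have g1 : 2 * q + 1 ≤ i := isDesc_ge h1
    have g2 : 2 * q + 2 ≤ i := isDesc_ge h2
    rcases eq_or_ne i (2 * q + 2) with he | he
    · subst he
      rw [isDesc, if_neg (by omega), if_neg (by omega)] at h1
      have : (2 * q + 2 - 1) / 2 = q := by omega
      rw [this] at h1
      have := isDesc_ge h1; omega
    · rw [isDesc, if_neg (by omega), if_neg (by omega)] at h1
      rw [isDesc, if_neg he, if_neg (by omega)] at h2
      exact ih ((i - 1) / 2) (by omega) ⟨h1, h2⟩

-- bounded subtree sums
def subSum (arr : List Int) (q : Nat) : Int :=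
  ∑ i ∈ Finset.range arr.length, if isDesc q i = true then arr.getD i 0 else 0

def psub (arr : List Int) (q : Nat) : Int :=
  ∑ i ∈ Finset.range arr.length, if isDesc q i = true ∧ i ≠ q then arr.getD i 0 else 0

lemma psub_eq (arr : List Int) (q : Nat) :
    psub arr q = subSum arr (2 * q + 1) + subSum arr (2 * q + 2) := by
  unfold psub subSum
  rw [← Finset.sum_add_distrib]
  apply Finset.sum_congr rfl
  intro i _
  by_cases h1 : isDesc (2 * q + 1) i = true
  · have hni := isDesc_disjoint q i
    have h2 : ¬ isDesc (2 * q + 2) i = true := fun h => hni ⟨h1, h⟩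
    rw [if_pos ((isDesc_split q i).2 (Or.inl h1)), if_pos h1, if_neg h2, add_zero]
  · by_cases h2 : isDesc (2 * q + 2) i = true
    · rw [if_pos ((isDesc_split q i).2 (Or.inr h2)), if_neg h1, if_pos h2, zero_add]
    · rw [if_neg, if_neg h1, if_neg h2, add_zero]
      intro hc
      rcases (isDesc_split q i).1 hc with h | h
      · exact h1 h
      · exact h2 h

lemma subSum_eq (arr : List Int) (c : Nat) :
    subSum arr c = if c < arr.length then arr.getD c 0 + psub arr c else 0 := by
  unfold subSum psub
  split_ifs with hc
  · have hsplit : ∀ i ∈ Finset.range arr.length,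
        (if isDesc c i = true then arr.getD i 0 else 0) =
        (if i = c then arr.getD i 0 else 0) +
        (if isDesc c i = true ∧ i ≠ c then arr.getD i 0 else 0) := by
      intro i _
      by_cases he : i = c
      · subst he; simp [isDesc_self]
      · by_cases hd : isDesc c i = true <;> simp [he, hd]
    rw [Finset.sum_congr rfl hsplit, Finset.sum_add_distrib, Finset.sum_ite_eq' _ c]
    simp [Finset.mem_range.2 hc]
  · apply Finset.sum_eq_zero
    intro i hi
    have : i < c := lt_of_lt_of_le (Finset.mem_range.1 hi) (by omega)
    rw [isDesc_lt this]; simp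

-- BFS invariant: the queue's remaining contribution is its proper-subtree sums
lemma solBfs_sum (arr : List Int) (queue : List Nat) (acc : List Int)
    (h : ∀ q ∈ queue, q < arr.length) :
    (solBfs arr queue acc).sum = acc.sum + (queue.map (fun q => psub arr q)).sum := by
  fun_induction solBfs arr queue acc with
  | case1 acc => simp
  | case2 node rest acc hbr =>
    exact absurd (h node (by simp)) (by omega)
  | case3 node rest acc hbr h1 h2 ih =>
    have hq : ∀ q ∈ rest ++ [2 * node + 1] ++ [2 * node + 2], q < arr.length := by
      intro q hq
      simp only [List.mem_append, List.mem_singleton] at hq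
      rcases hq with (hq | hq) | hq
      · exact h q (List.mem_cons_of_mem _ hq)
      · omega
      · omega
    rw [ih hq]
    simp only [List.map_append, List.map_cons, List.map_nil, List.sum_append, List.sum_cons,
      List.sum_nil]
    have hps := psub_eq arr node
    rw [subSum_eq, subSum_eq, if_pos h1, if_pos h2] at hps
    omega
  | case4 node rest acc hbr h1 h2 ih =>
    have hq : ∀ q ∈ rest ++ [2 * node + 1], q < arr.length := by
      intro q hq
      simp only [List.mem_append, List.mem_singleton] at hq
      rcases hq with hq | hq
      · exact h q (List.mem_cons_of_mem _ hq)
      · omega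
    rw [ih hq]
    simp only [List.map_append, List.map_cons, List.map_nil, List.sum_append, List.sum_cons,
      List.sum_nil]
    have hps := psub_eq arr node
    rw [subSum_eq, subSum_eq, if_pos h1, if_neg h2] at hps
    omega
  | case5 node rest acc hbr h1 h2 ih =>
    exact absurd h2 (by omega)
  | case6 node rest acc hbr h1 h2 ih =>
    have hq : ∀ q ∈ rest, q < arr.length := fun q hq => h q (List.mem_cons_of_mem _ hq)
    rw [ih hq]
    simp only [List.map_cons, List.sum_cons]
    have hps := psub_eq arr node
    rw [subSum_eq, subSum_eq, if_neg (by omega), if_neg h2] at hps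
    omega

-- root classification: rootOf agrees with the two subtree memberships
lemma root_spec : ∀ i, 1 ≤ i →
    (rootOf i = 1 ∨ rootOf i = 2) ∧
    (isDesc 1 i = true ↔ rootOf i = 1) ∧ (isDesc 2 i = true ↔ rootOf i = 2) := by
  intro i
  induction i using Nat.strong_induction_on with
  | _ i ih =>
    intro h1
    by_cases h3 : i ≤ 2
    · interval_cases i
      · rw [rootOf]
        refine ⟨by simp, by simp [isDesc_self], by simp [isDesc_lt]⟩
      · rw [rootOf]
        refine ⟨by simp, ?_, by simp [isDesc_self]⟩
        have : isDesc 1 2 = false := by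
          rw [isDesc]
          norm_num [isDesc_lt]
        simp [this]
    · have hp : (i - 1) / 2 < i := by omega
      have hp1 : 1 ≤ (i - 1) / 2 := by omega
      obtain ⟨ha, hb, hc⟩ := ih _ hp hp1
      have hr : rootOf i = rootOf ((i - 1) / 2) := by rw [rootOf, if_pos (by omega)]
      have hd1 : isDesc 1 i = isDesc 1 ((i - 1) / 2) := by
        rw [isDesc, if_neg (by omega), if_neg (by omega)]
      have hd2 : isDesc 2 i = isDesc 2 ((i - 1) / 2) := by
        rw [isDesc, if_neg (by omega), if_neg (by omega)]
      rw [hr, hd1, hd2]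
      exact ⟨ha, hb, hc⟩

-- B's fold computes the two root-classified partial sums over [3, b)
lemma foldB (arr : List Int) : ∀ (b : Nat), 3 ≤ b → ∀ (p : Int × Int),
    ((PySem.List.pyRange 3 (b : Int) 1).foldl
      (fun (p : Int × Int) i =>
        if rootOf i.toNat = 1 then (p.1 + arr.getD i.toNat 0, p.2)
        else (p.1, p.2 + arr.getD i.toNat 0)) p) =
    (p.1 + ∑ i ∈ Finset.Ico 3 b, (if rootOf i = 1 then arr.getD i 0 else 0),
     p.2 + ∑ i ∈ Finset.Ico 3 b, (if rootOf i = 1 then 0 else arr.getD i 0)) := by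
  intro b
  induction b with
  | zero => omega
  | succ b ihb =>
    intro hb p
    rcases eq_or_lt_of_le hb with he | hlt
    · have hnil : PySem.List.pyRange 3 ((b : Int) + 1) 1 = [] :=
        PySem.List.pyRange_one_eq_nil (by omega)
      have hb3 : b + 1 = 3 := he.symm
      rw [Nat.cast_add, Nat.cast_one, hnil]
      simp [hb3]
    · have hb' : 3 ≤ b := by omega
      have hsplit : PySem.List.pyRange 3 ((b : Int) + 1) 1 =
          PySem.List.pyRange 3 (b : Int) 1 ++ [(b : Int)] :=
        PySem.List.pyRange_one_succ_right (by omega)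
      rw [Nat.cast_add, Nat.cast_one, hsplit, List.foldl_append, ihb hb' p]
      simp only [List.foldl_cons, List.foldl_nil, Int.toNat_natCast]
      rw [Finset.sum_Ico_succ_top hb', Finset.sum_Ico_succ_top hb']
      by_cases hr : rootOf b = 1
      · rw [if_pos hr, if_pos hr, if_pos hr]
        simp [add_assoc]
      · rw [if_neg hr, if_neg hr, if_neg hr]
        simp [add_assoc]

-- bridges: subtree sums of roots 1 and 2 = seed value + root-classified tail sum
lemma subSum_one (arr : List Int) (h : 3 ≤ arr.length) :
    subSum arr 1 = arr.getD 1 0 + ∑ i ∈ Finset.Ico 3 arr.length,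
      (if rootOf i = 1 then arr.getD i 0 else 0) := by
  unfold subSum
  rw [Finset.range_eq_Ico, ← Finset.sum_Ico_consecutive _ (by omega : (0:ℕ) ≤ 3) h]
  have d0 : isDesc 1 0 = false := isDesc_lt (by omega)
  have d2 : isDesc 1 2 = false := by
    rw [isDesc]; norm_num; exact d0
  have hhead : ∑ i ∈ Finset.Ico 0 3, (if isDesc 1 i = true then arr.getD i 0 else 0)
      = arr.getD 1 0 := by
    rw [show Finset.Ico 0 3 = {0, 1, 2} from by decide]
    rw [Finset.sum_insert (by decide), Finset.sum_insert (by decide), Finset.sum_singleton]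
    simp [d0, d2, isDesc_self]
  rw [hhead]
  congr 1
  apply Finset.sum_congr rfl
  intro i hi
  have h3 : 3 ≤ i := (Finset.mem_Ico.1 hi).1
  exact if_congr ((root_spec i (by omega)).2.1) rfl rfl

lemma subSum_two (arr : List Int) (h : 3 ≤ arr.length) :
    subSum arr 2 = arr.getD 2 0 + ∑ i ∈ Finset.Ico 3 arr.length,
      (if rootOf i = 1 then 0 else arr.getD i 0) := by
  unfold subSum
  rw [Finset.range_eq_Ico, ← Finset.sum_Ico_consecutive _ (by omega : (0:ℕ) ≤ 3) h]
  have d0 : isDesc 2 0 = false := isDesc_lt (by omega)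
  have d1 : isDesc 2 1 = false := isDesc_lt (by omega)
  have hhead : ∑ i ∈ Finset.Ico 0 3, (if isDesc 2 i = true then arr.getD i 0 else 0)
      = arr.getD 2 0 := by
    rw [show Finset.Ico 0 3 = {0, 1, 2} from by decide]
    rw [Finset.sum_insert (by decide), Finset.sum_insert (by decide), Finset.sum_singleton]
    simp [d0, d1, isDesc_self]
  rw [hhead]
  congr 1
  apply Finset.sum_congr rfl
  intro i hi
  have h3 : 3 ≤ i := (Finset.mem_Ico.1 hi).1
  obtain ⟨hor, hb1, hb2⟩ := root_spec i (by omega)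
  by_cases hr : rootOf i = 1
  · rw [if_pos hr, if_neg]
    intro hd
    have := hb2.1 hd
    omega
  · have h2 : rootOf i = 2 := by rcases hor with h | h <;> omega
    rw [if_neg hr, if_pos (hb2.2 h2)]

-- ===== VERDICT (by name: the statement is the Claim_ definition above) =====
theorem solution_spec : Claim_equal_solution := by
  intro arr _ hpre
  unfold Spec_solution
  rcases hpre with rfl | h3
  · rfl
  · have hne : arr ≠ [] := by intro h; rw [h] at h3; simp at h3
    have hL : (solBfs arr [1] [arr.getD 1 0]).sum = subSum arr 1 := by
      rw [solBfs_sum arr [1] _ (by intro q hq; simp at hq; omega)]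
      have := subSum_eq arr 1
      rw [if_pos (by omega : 1 < arr.length)] at this
      rw [this]; simp
    have hR : (solBfs arr [2] [arr.getD 2 0]).sum = subSum arr 2 := by
      rw [solBfs_sum arr [2] _ (by intro q hq; simp at hq; omega)]
      have := subSum_eq arr 2
      rw [if_pos (by omega : 2 < arr.length)] at this
      rw [this]; simp
    simp only [solution, solution_alt, if_neg hne]
    rw [hL, hR, foldB arr arr.length h3, subSum_one arr h3, subSum_two arr h3]
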